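-- pv_equiv track=rewrite | github.com/AndrewAcomb/KBQA-SaaS-SimpliFi | kbqa-saas-flask/data-parsing/embedding_generators/vocab2id_augmentor.py | augment_vocab
-- ===== SOURCE A (Python) =====
-- def add_topic_entity(vocab, topic_entity, index):
--     """
--     Description:
--     Parameters:
--     Return:
--     """
--     topic_entity_lower = topic_entity.lower()
--
--     if topic_entity_lower not in vocab:
--
--         vocab[topic_entity_lower] = index = index + 1
--
--     return (vocab, index)
--
-- def add_entity(vocab, entity, index):
--     """
--     Description:
--     Parameters:
--     Return:
--     """
--     entity_words = entity.replace("-", " ").split(" ")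
--     for entity_word in entity_words:
--
--         entity_word_lower = entity_word.lower()
--
--         if entity_word_lower not in vocab:
--
--             vocab[entity_word_lower] = index = index + 1
--
--     return (vocab, index)
--
-- def augment_vocab(data, old_vocab):
--     """
--     Description: Adds new topic entities to vocab2id. Starts off from last index.
--     Parameters: (Dict) Raw data from load functions, (Dict) Original vocab2id.
--     Return: (Dict) Vocab2id augmented with new topic entities.
--     """
--     index = max(old_vocab.values())
--     vocab = old_vocab
--
--     for topic_entity, topic_entity_info in data.items():
--
--         vocab, index = add_topic_entity(vocab, topic_entity, index)
--
--         for entity in topic_entity_info.keys():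
--
--             vocab, index = add_entity(vocab, entity, index)
--
--     return vocab
-- ===== SOURCE B (Python) =====
-- def augment_vocab(data, old_vocab):
--     """Dedup-first with arithmetic numbering: flatten all candidate keys, take
--     first occurrences via dict.fromkeys, drop those already present, and number
--     the fresh keys by their position (base+1+i) in one batch update."""
--     base = max(old_vocab.values())
--     candidates = [key.lower()
--                   for topic_entity, info in data.items()
--                   for key in [topic_entity]
--                              + [w for entity in info
--                                   for w in entity.replace("-", " ").split(" ")]]
--     fresh = [k for k in dict.fromkeys(candidates) if k not in old_vocab]
--     old_vocab.update({k: base + 1 + i for i, k in enumerate(fresh)})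
--     return old_vocab
-- ===== Notes on version B (the rewrite author's own statement) =====
-- stated objective: alternative
-- what changed: Replaced the incremental insert-as-you-go accumulator (helpers threading (vocab,index) through nested loops) with a dedup-first batch algorithm: flatten all candidate keys, dict.fromkeys-deduplicate, filter out keys already in old_vocab, then assign indices arithmetically as base+1+position via enumerate in one batch update.
import Mathlib
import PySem

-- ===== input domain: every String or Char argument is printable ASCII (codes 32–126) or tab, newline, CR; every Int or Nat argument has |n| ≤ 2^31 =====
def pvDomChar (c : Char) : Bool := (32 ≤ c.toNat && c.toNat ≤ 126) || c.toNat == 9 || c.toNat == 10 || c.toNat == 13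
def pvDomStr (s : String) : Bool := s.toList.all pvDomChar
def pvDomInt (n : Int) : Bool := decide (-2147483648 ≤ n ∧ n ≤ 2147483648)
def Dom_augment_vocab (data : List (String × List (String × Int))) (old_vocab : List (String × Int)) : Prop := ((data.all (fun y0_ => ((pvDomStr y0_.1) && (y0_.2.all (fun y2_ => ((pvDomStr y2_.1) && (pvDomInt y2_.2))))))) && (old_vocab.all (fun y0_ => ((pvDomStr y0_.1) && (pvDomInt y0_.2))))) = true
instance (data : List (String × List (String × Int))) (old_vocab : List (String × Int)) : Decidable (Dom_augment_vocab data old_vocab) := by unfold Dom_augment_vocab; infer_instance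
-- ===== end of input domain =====

-- B replaces A's incremental insert-as-you-go index accumulator with a dedup-first batch
-- algorithm (flatten, dict.fromkeys-dedup, filter, number fresh keys arithmetically by
-- position); objective: alternative. Both Pythons mutate old_vocab in place; the
-- equivalence proved here is about the returned dict.

-- ===== PORT A =====
-- entity.replace("-", " ").split(" ")  (split(" ") keeps empty pieces; PySem.Str.split? is exact)
def avWords (entity : String) : List String :=
  (PySem.Str.split? (PySem.Str.replace entity "-" " ") " ").getD []

def avAddTopicEntity (vocab : PySem.Dict String Int) (topic_entity : String) (index : Int) :
    PySem.Dict String Int × Int :=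
  let tl := PySem.Str.lower topic_entity
  if vocab.contains tl then (vocab, index) else (vocab.insert tl (index + 1), index + 1)

def avAddEntity (vocab : PySem.Dict String Int) (entity : String) (index : Int) :
    PySem.Dict String Int × Int :=
  (avWords entity).foldl
    (fun st w =>
      let wl := PySem.Str.lower w
      if st.1.contains wl then st else (st.1.insert wl (st.2 + 1), st.2 + 1))
    (vocab, index)

def augment_vocab (data : List (String × List (String × Int))) (old_vocab : List (String × Int)) : List (String × Int) :=
  let v0 : PySem.Dict String Int := PySem.Dict.ofList old_vocab
  match PySem.List.max? v0.values (fun x => x) with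
  | none => []   -- Python raises ValueError here (max of empty); excluded by Pre_
  | some index =>
    ((PySem.Dict.ofList data).items.foldl
      (fun st p =>
        let st1 := avAddTopicEntity st.1 p.1 st.2
        (PySem.Dict.ofList p.2).keys.foldl (fun st2 e => avAddEntity st2.1 e st2.2) st1)
      (v0, index)).1.items

-- ===== PORT B =====
-- the flat candidate-key comprehension of Source B
def bvCandidates (data : List (String × List (String × Int))) : List String :=
  (PySem.Dict.ofList data).items.flatMap
    (fun p => ((p.1 :: (PySem.Dict.ofList p.2).keys.flatMap avWords).map PySem.Str.lower))

def augment_vocab_alt (data : List (String × List (String × Int))) (old_vocab : List (String × Int)) : List (String × Int) :=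
  let v0 : PySem.Dict String Int := PySem.Dict.ofList old_vocab
  match PySem.List.max? v0.values (fun x => x) with
  | none => []   -- Python raises ValueError here (max of empty); excluded by Pre_
  | some base =>
    -- dict.fromkeys dedup = PySem.List.dedup (first occurrences, in order)
    let fresh := (PySem.List.dedup (bvCandidates data)).filter (fun k => !(v0.contains k))
    -- {k: base+1+i for i, k in enumerate(fresh)}, then old_vocab.update(...)
    (((PySem.List.enumerate fresh).map (fun p => (p.2, base + 1 + p.1))).foldl
      (fun d kv => d.insert kv.1 kv.2) v0).items

-- ===== PRECONDITION & SPEC =====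
-- Pre_ excludes exactly the inputs where Python A raises: empty old_vocab (max() of empty → ValueError).
def Pre_augment_vocab (data : List (String × List (String × Int))) (old_vocab : List (String × Int)) : Prop :=
  old_vocab ≠ []
instance (data : List (String × List (String × Int))) (old_vocab : List (String × Int)) : Decidable (Pre_augment_vocab data old_vocab) := by unfold Pre_augment_vocab; infer_instance

def pvWitness_augment_vocab : (List (String × List (String × Int))) × (List (String × Int)) :=
  ([("A", [("x-y", 1)])], [("hi", 3)])

def Spec_augment_vocab (data : List (String × List (String × Int))) (old_vocab : List (String × Int)) (out : List (String × Int)) : Prop := out = augment_vocab_alt data old_vocab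
instance (data : List (String × List (String × Int))) (old_vocab : List (String × Int)) (out : List (String × Int)) : Decidable (Spec_augment_vocab data old_vocab out) := by unfold Spec_augment_vocab; infer_instance

-- ===== CLAIM =====
def Claim_equal_augment_vocab : Prop := ∀ (data : List (String × List (String × Int))) (old_vocab : List (String × Int)), Dom_augment_vocab data old_vocab → Pre_augment_vocab data old_vocab → Spec_augment_vocab data old_vocab (augment_vocab data old_vocab)

-- ===== LEMMAS AND PROOFS =====

-- A's single insertion step on a state, and the keys one item of data contributes, in order
def avInsertStep (st : PySem.Dict String Int × Int) (key : String) : PySem.Dict String Int × Int :=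
  if st.1.contains key then st else (st.1.insert key (st.2 + 1), st.2 + 1)

def avItemKeys (p : String × List (String × Int)) : List String :=
  PySem.Str.lower p.1 :: (PySem.Dict.ofList p.2).keys.flatMap (fun e => (avWords e).map PySem.Str.lower)

-- the fresh keys A's loop actually inserts, given a membership predicate, in order
def avFresh (mem : String → Bool) : List String → List String
  | [] => []
  | k :: t => if mem k then avFresh mem t else k :: avFresh (fun x => x == k || mem x) t

-- inserting a list of keys with consecutive indices starting at j
def avNumIns (d : PySem.Dict String Int) (j : Int) : List String → PySem.Dict String Int
  | [] => d
  | k :: t => avNumIns (d.insert k j) (j + 1) t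

theorem avAddEntity_eq (v : PySem.Dict String Int) (e : String) (i : Int) :
    avAddEntity v e i = ((avWords e).map PySem.Str.lower).foldl avInsertStep (v, i) := by
  rw [List.foldl_map]; rfl

theorem foldl_insert_flatMap (g : String → List String)
    (ks : List String) (st : PySem.Dict String Int × Int) :
    ks.foldl (fun st2 e => (g e).foldl avInsertStep st2) st
      = (ks.flatMap g).foldl avInsertStep st := by
  induction ks generalizing st with
  | nil => rfl
  | cons e t ih => simp [List.foldl_append, ih]

theorem avStep_eq (st : PySem.Dict String Int × Int) (p : String × List (String × Int)) :
    (let st1 := avAddTopicEntity st.1 p.1 st.2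
     (PySem.Dict.ofList p.2).keys.foldl (fun st2 e => avAddEntity st2.1 e st2.2) st1)
      = (avItemKeys p).foldl avInsertStep st := by
  show _ = ((PySem.Dict.ofList p.2).keys.flatMap (fun e => (avWords e).map PySem.Str.lower)).foldl
      avInsertStep (avInsertStep st (PySem.Str.lower p.1))
  rw [← foldl_insert_flatMap]
  have h1 : avAddTopicEntity st.1 p.1 st.2 = avInsertStep st (PySem.Str.lower p.1) := rfl
  rw [h1]
  apply PySem.List.foldl_congr_mem
  intro acc e _
  rw [avAddEntity_eq]

theorem avMain (items : List (String × List (String × Int))) (st : PySem.Dict String Int × Int) :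
    items.foldl
      (fun st p =>
        let st1 := avAddTopicEntity st.1 p.1 st.2
        (PySem.Dict.ofList p.2).keys.foldl (fun st2 e => avAddEntity st2.1 e st2.2) st1) st
      = (items.flatMap avItemKeys).foldl avInsertStep st := by
  induction items generalizing st with
  | nil => rfl
  | cons p t ih =>
    simp only [List.foldl_cons, List.flatMap_cons, List.foldl_append]
    rw [ih, avStep_eq]

-- B's candidate list is the flat list of keys A visits, in order
theorem bvCandidates_eq (data : List (String × List (String × Int))) :
    bvCandidates data = (PySem.Dict.ofList data).items.flatMap avItemKeys := by
  unfold bvCandidates avItemKeys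
  simp [List.map_flatMap]

-- A's foldl inserts exactly the fresh keys, numbered consecutively
theorem foldl_avInsertStep_eq (ks : List String) (d : PySem.Dict String Int) (i : Int) :
    ks.foldl avInsertStep (d, i)
      = (avNumIns d (i + 1) (avFresh d.contains ks),
         i + (avFresh d.contains ks).length) := by
  induction ks generalizing d i with
  | nil => simp [avFresh, avNumIns]
  | cons k t ih =>
    by_cases h : d.contains k
    · have hstep : avInsertStep (d, i) k = (d, i) := by simp [avInsertStep, h]
      have hf : avFresh d.contains (k :: t) = avFresh d.contains t := by simp [avFresh, h]
      simp only [List.foldl_cons, hstep, ih, hf]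
    · have hstep : avInsertStep (d, i) k = (d.insert k (i + 1), i + 1) := by
        simp [avInsertStep, h]
      have hc : (d.insert k (i + 1)).contains = fun x => x == k || d.contains x := by
        funext x; simp [PySem.Dict.contains_insert]
      have hf : avFresh d.contains (k :: t)
          = k :: avFresh (fun x => x == k || d.contains x) t := by simp [avFresh, h]
      simp only [List.foldl_cons, hstep, ih, hc, hf, avNumIns, List.length_cons]
      refine Prod.ext rfl ?_
      push_cast
      omega

-- avFresh is dedup-then-filter
theorem avFresh_eq (ks : List String) (mem : String → Bool) :
    avFresh mem ks = (PySem.List.dedup ks).filter (fun k => !mem k) := by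
  induction ks generalizing mem with
  | nil => rfl
  | cons k t ih =>
    have hded : PySem.List.dedup (k :: t) = k :: PySem.Set.discard (PySem.List.dedup t) k := by
      simp [PySem.List.dedup_eq_ofList, PySem.Set.ofList_cons]
    have hdisc : ∀ (l : List String) (q : String → Bool),
        (PySem.Set.discard l k).filter q = l.filter (fun x => q x && !(x == k)) := by
      intro l q
      simp only [PySem.Set.discard, List.filter_filter]
    by_cases h : mem k
    · have hf : avFresh mem (k :: t) = avFresh mem t := by simp [avFresh, h]
      rw [hf, ih, hded, List.filter_cons]
      simp only [h, Bool.not_true, hdisc]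
      apply List.filter_congr
      intro x _
      by_cases hx : x = k
      · subst hx; simp [h]
      · have hb : (x == k) = false := beq_false_of_ne hx
        simp [hb]
    · have hf : avFresh mem (k :: t) = k :: avFresh (fun x => x == k || mem x) t := by
        simp [avFresh, h]
      rw [hf, ih, hded, List.filter_cons]
      simp only [h, Bool.not_false, if_true, hdisc]
      congr 1
      apply List.filter_congr
      intro x _
      by_cases hx : x = k
      · subst hx; simp [h]
      · have hb : (x == k) = false := beq_false_of_ne hx
        simp [hb]

-- B's enumerate-map-insert loop is consecutive numbering
theorem enumerate_foldl_eq (ks : List String) (d : PySem.Dict String Int) (j s : Int) :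
    ((PySem.List.enumerate ks s).map (fun p => (p.2, j + p.1))).foldl
      (fun d kv => d.insert kv.1 kv.2) d = avNumIns d (j + s) ks := by
  induction ks generalizing d s with
  | nil => simp [PySem.List.enumerate_nil, avNumIns]
  | cons k t ih =>
    rw [PySem.List.enumerate_cons]
    simp only [List.map_cons, List.foldl_cons, avNumIns]
    rw [ih]
    congr 1
    omega

-- ===== VERDICT =====
theorem augment_vocab_spec : Claim_equal_augment_vocab := by
  intro data old_vocab _ _
  unfold Spec_augment_vocab augment_vocab augment_vocab_alt
  cases h : PySem.List.max? (PySem.Dict.ofList old_vocab).values (fun x => x) with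
  | none => simp only [h]
  | some base =>
    simp only [h, avMain, ← bvCandidates_eq, foldl_avInsertStep_eq, avFresh_eq,
      enumerate_foldl_eq]
    norm_num
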